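-- pv_equiv track=rewrite | github.com/saorsa-labs/four-word-networking | replacement_suggestions.py | find_conflict_groups
-- ===== SOURCE A (Python) =====
-- from collections import defaultdict
--
-- def find_conflict_groups(words, max_prefix_length=5):
--     """Find groups of words that conflict within the given prefix length."""
--     prefix_to_words = defaultdict(list)
--
--     for word in words:
--         prefix = word[:max_prefix_length]
--         prefix_to_words[prefix].append(word)
--
--     return {
--         prefix: word_list
--         for prefix, word_list in prefix_to_words.items()
--         if len(word_list) > 1
--     }
-- ===== SOURCE B (Python) =====
-- from collections import Counter
--
-- def find_conflict_groups(words, max_prefix_length=5):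
--     """Count prefixes once, then build only the conflicting groups in a second pass."""
--     counts = Counter(w[:max_prefix_length] for w in words)
--     result = {}
--     for w in words:
--         p = w[:max_prefix_length]
--         if counts[p] > 1:
--             result.setdefault(p, []).append(w)
--     return result
-- ===== Notes on version B (the rewrite author's own statement) =====
-- stated objective: alternative
-- what changed: Instead of materialising a word list for every prefix and then filtering the dict by list length, B counts prefixes once with a Counter and in a second pass appends only words whose prefix count exceeds 1, building exactly the conflicting groups.
import Mathlib
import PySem

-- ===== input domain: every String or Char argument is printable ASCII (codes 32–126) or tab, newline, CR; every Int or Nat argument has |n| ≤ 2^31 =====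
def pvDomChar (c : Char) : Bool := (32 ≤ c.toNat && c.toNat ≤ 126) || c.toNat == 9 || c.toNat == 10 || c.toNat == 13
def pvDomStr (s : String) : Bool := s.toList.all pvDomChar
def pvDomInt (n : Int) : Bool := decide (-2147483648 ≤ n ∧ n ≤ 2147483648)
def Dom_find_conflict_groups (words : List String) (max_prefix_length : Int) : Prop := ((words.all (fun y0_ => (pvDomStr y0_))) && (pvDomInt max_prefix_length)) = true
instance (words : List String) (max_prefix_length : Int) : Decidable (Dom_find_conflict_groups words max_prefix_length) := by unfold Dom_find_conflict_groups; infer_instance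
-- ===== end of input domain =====

-- B counts the prefixes once with a Counter and then builds only the conflicting groups in a
-- second pass, instead of materialising every prefix's word list and filtering afterwards.

-- word[:max_prefix_length], used by both ports
def pvPrefix (max_prefix_length : Int) (w : String) : String :=
  PySem.Str.slice w none (some max_prefix_length)

-- ===== PORT A =====
def find_conflict_groups (words : List String) (max_prefix_length : Int) : List (String × List String) :=
  -- prefix_to_words = defaultdict(list); for word in words: prefix_to_words[word[:m]].append(word)
  let prefix_to_words : PySem.Dict String (List String) :=
    words.foldl (fun d word => d.modify (pvPrefix max_prefix_length word) [] (fun l => l ++ [word]))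
      PySem.Dict.empty
  -- {prefix: wl for prefix, wl in prefix_to_words.items() if len(wl) > 1}
  prefix_to_words.items.filter (fun q => decide (1 < q.2.length))

-- ===== PORT B =====
def find_conflict_groups_alt (words : List String) (max_prefix_length : Int) : List (String × List String) :=
  -- counts = Counter(w[:m] for w in words)
  let counts : PySem.Dict String Int := PySem.Dict.counter (words.map (pvPrefix max_prefix_length))
  -- result = {}; for w in words: if counts[p] > 1: result.setdefault(p, []).append(w)
  let result : PySem.Dict String (List String) :=
    words.foldl (fun r w =>
      let p := pvPrefix max_prefix_length w
      if 1 < counts.getD p 0 then r.modify p [] (fun l => l ++ [w]) else r)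
      PySem.Dict.empty
  result.items

-- ===== PRECONDITION & SPEC =====
def Spec_find_conflict_groups (words : List String) (max_prefix_length : Int) (out : List (String × List String)) : Prop := out = find_conflict_groups_alt words max_prefix_length
instance (words : List String) (max_prefix_length : Int) (out : List (String × List String)) : Decidable (Spec_find_conflict_groups words max_prefix_length out) := by unfold Spec_find_conflict_groups; infer_instance

-- ===== CLAIM (what is proved, stated in full; the proofs are below) =====
def Claim_equal_find_conflict_groups : Prop := ∀ (words : List String) (max_prefix_length : Int), Dom_find_conflict_groups words max_prefix_length → Spec_find_conflict_groups words max_prefix_length (find_conflict_groups words max_prefix_length)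

-- ===== LEMMAS AND PROOFS =====

-- keep-first dedup (PySem.Set.ofList) commutes with filter
theorem pv_add_filter {α : Type} [BEq α] [LawfulBEq α] (p : α → Bool) (s : PySem.Set α) (x : α) :
    (PySem.Set.add s x).filter p =
      if p x then PySem.Set.add (s.filter p) x else s.filter p := by
  by_cases hmem : x ∈ s
  · by_cases hx : p x
    · have h2 : x ∈ s.filter p := List.mem_filter.mpr ⟨hmem, hx⟩
      simp [PySem.Set.add, hmem, hx, h2]
    · simp [PySem.Set.add, hmem, hx]
  · by_cases hx : p x
    · have h2 : x ∉ s.filter p := fun h => hmem (List.mem_filter.mp h).1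
      simp [PySem.Set.add, hmem, hx, h2, List.filter_append]
    · simp [PySem.Set.add, hmem, hx, List.filter_append]

theorem pv_update_filter {α : Type} [BEq α] [LawfulBEq α] (p : α → Bool) :
    ∀ (l : List α) (s : PySem.Set α),
      (PySem.Set.update s l).filter p = PySem.Set.update (s.filter p) (l.filter p) := by
  intro l
  induction l with
  | nil => intro s; simp [PySem.Set.update]
  | cons x l ih =>
    intro s
    have hstep : PySem.Set.update s (x :: l) = PySem.Set.update (PySem.Set.add s x) l := by
      simp [PySem.Set.update]
    rw [hstep, ih]
    by_cases hx : p x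
    · simp [hx, pv_add_filter, PySem.Set.update]
    · simp [hx, pv_add_filter, PySem.Set.update]

theorem pv_ofList_filter {α : Type} [BEq α] [LawfulBEq α] (p : α → Bool) (l : List α) :
    PySem.Set.ofList (l.filter p) = (PySem.Set.ofList l).filter p := by
  have h := pv_update_filter p l ([] : PySem.Set α)
  simpa [PySem.Set.ofList, PySem.Set.empty] using h.symm

-- the A-side grouping fold, named for reuse
def pvGroups (words : List String) (m : Int) : PySem.Dict String (List String) :=
  words.foldl (fun d word => d.modify (pvPrefix m word) [] (fun l => l ++ [word])) PySem.Dict.empty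

theorem pvGroups_getD (words : List String) (m : Int) (k : String) :
    (pvGroups words m).getD k [] = words.filter (fun w => pvPrefix m w == k) := by
  have hmap : pvGroups words m =
      (words.map (fun w => (pvPrefix m w, w))).foldl
        (fun d q => d.modify q.1 [] (fun l => l ++ [q.2])) PySem.Dict.empty := by
    simp [pvGroups, List.foldl_map]
  rw [hmap, PySem.Dict.getD_foldl_modify_append]
  simp [List.filter_map, Function.comp_def]

theorem pvGroups_keys (words : List String) (m : Int) :
    (pvGroups words m).keys = PySem.Set.ofList (words.map (pvPrefix m)) := by
  unfold pvGroups
  rw [PySem.Dict.keys_foldl_modify_key]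
  simp [PySem.Set.ofList, PySem.Set.update, PySem.Dict.empty, PySem.Dict.keys]

theorem pvGroups_nodup (words : List String) (m : Int) : (pvGroups words m).keys.Nodup := by
  unfold pvGroups
  exact PySem.Dict.nodup_keys_foldl_modify_key _ _ _ _ _ (by simp [PySem.Dict.empty, PySem.Dict.keys])

theorem pvGroups_items (words : List String) (m : Int) :
    (pvGroups words m).items =
      (PySem.Set.ofList (words.map (pvPrefix m))).map
        (fun k => (k, words.filter (fun w => pvPrefix m w == k))) := by
  rw [PySem.Dict.items_eq_map_keys _ (pvGroups_nodup words m) [], pvGroups_keys]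
  exact List.map_congr_left (fun k _ => by rw [pvGroups_getD])

-- group size = prefix count
theorem pv_len_eq_count (words : List String) (m : Int) (k : String) :
    (words.filter (fun w => pvPrefix m w == k)).length = (words.map (pvPrefix m)).count k := by
  simp [List.count, List.countP_map, ← List.countP_eq_length_filter, Function.comp_def]

theorem find_conflict_groups_eq (words : List String) (m : Int) :
    find_conflict_groups words m = find_conflict_groups_alt words m := by
  set cnt : String → Int := fun k => (PySem.Dict.counter (words.map (pvPrefix m))).getD k 0 with hcnt
  have hcntD : ∀ k, cnt k = ((words.map (pvPrefix m)).count k : Int) := by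
    intro k; simp [hcnt, PySem.Dict.getD_counter]
  set cB : String → Bool := fun k => decide (1 < cnt k) with hcB
  -- condition "1 < cnt k" expressed on group length
  have hcond : ∀ k, (decide (1 < (words.filter (fun w => pvPrefix m w == k)).length)) = cB k := by
    intro k
    have := pv_len_eq_count words m k
    simp only [hcB, hcntD k]
    rw [this]
    simp
  -- A side
  have hA : find_conflict_groups words m =
      ((PySem.Set.ofList (words.map (pvPrefix m))).filter cB).map
        (fun k => (k, words.filter (fun w => pvPrefix m w == k))) := by
    show (pvGroups words m).items.filter (fun q => decide (1 < q.2.length)) = _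
    rw [pvGroups_items, List.filter_map]
    congr 1
    exact List.filter_congr (fun k _ => by simpa [Function.comp] using hcond k)
  -- B side: the guarded fold is the plain fold over the filtered list
  set ws' : List String := words.filter (fun w => cB (pvPrefix m w)) with hws'
  have hB : find_conflict_groups_alt words m = (pvGroups ws' m).items := by
    show (words.foldl (fun r w =>
        if 1 < cnt (pvPrefix m w) then r.modify (pvPrefix m w) [] (fun l => l ++ [w]) else r)
        PySem.Dict.empty).items = _
    rw [hws', pvGroups, List.foldl_filter]
    have hf : (fun (r : PySem.Dict String (List String)) w =>
        if 1 < cnt (pvPrefix m w) then r.modify (pvPrefix m w) [] (fun l => l ++ [w]) else r)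
        = (fun (r : PySem.Dict String (List String)) w =>
            if cB (pvPrefix m w) = true then r.modify (pvPrefix m w) [] (fun l => l ++ [w]) else r) := by
      funext r w
      by_cases h : (1 : Int) < cnt (pvPrefix m w)
      · simp [hcB, h]
      · simp [hcB, h]
    rw [hf]
  rw [hA, hB, pvGroups_items]
  -- keys of the B side are the filtered keys of the A side
  have hkeys : PySem.Set.ofList (ws'.map (pvPrefix m)) =
      (PySem.Set.ofList (words.map (pvPrefix m))).filter cB := by
    have hc : (fun w => cB (pvPrefix m w)) = (cB ∘ pvPrefix m) := rfl
    rw [hws', hc, ← List.filter_map, pv_ofList_filter]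
  rw [hkeys]
  -- and on conflicting keys the B-side group is the full group
  apply List.map_congr_left
  intro k hk
  have hkB : cB k = true := (List.mem_filter.mp hk).2
  have : ws'.filter (fun w => pvPrefix m w == k) = words.filter (fun w => pvPrefix m w == k) := by
    rw [hws', List.filter_filter]
    apply List.filter_congr
    intro w _
    by_cases hwk : pvPrefix m w == k
    · have : pvPrefix m w = k := by simpa using hwk
      simp [this, hkB]
    · simp [hwk]
  rw [this]

-- ===== VERDICT (by name: the statement is the Claim_ definition above) =====
theorem find_conflict_groups_spec : Claim_equal_find_conflict_groups := by
  intro words m _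
  show find_conflict_groups words m = find_conflict_groups_alt words m
  exact find_conflict_groups_eq words m
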